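-- pv_equiv track=rewrite | github.com/zhouzebiao/text_model | Transformer/tokenizer.py | _filter_and_bucket_subtokens
-- ===== SOURCE A (Python) =====
-- def _filter_and_bucket_subtokens(subtoken_counts, min_count):
--     # 相同长度，放buckets
--     subtoken_buckets = []
--     for subtoken, count in subtoken_counts.items():
--         if count < min_count:
--             continue
--         while len(subtoken_buckets) <= len(subtoken):
--             subtoken_buckets.append(set())
--         subtoken_buckets[len(subtoken)].add(subtoken)
--     return subtoken_buckets
-- ===== SOURCE B (Python) =====
-- def _filter_and_bucket_subtokens(subtoken_counts, min_count):
--     # Staged: one filtering pass, a max-length pass, then one scan per length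
--     # to build each bucket directly (no dict, no incremental list growth).
--     kept = [s for s, c in subtoken_counts.items() if c >= min_count]
--     if not kept:
--         return []
--     maxlen = max(map(len, kept))
--     return [set(s for s in kept if len(s) == l) for l in range(maxlen + 1)]
-- ===== Notes on version B (the rewrite author's own statement) =====
-- stated objective: alternative
-- what changed: Replaces A's single pass that grows the bucket list on the fly and mutates buckets in place by a staged algorithm: one filtering pass collecting the surviving subtokens, a max-length pass, then one separate scan of the survivors per length to build each bucket directly.
import Mathlib
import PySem

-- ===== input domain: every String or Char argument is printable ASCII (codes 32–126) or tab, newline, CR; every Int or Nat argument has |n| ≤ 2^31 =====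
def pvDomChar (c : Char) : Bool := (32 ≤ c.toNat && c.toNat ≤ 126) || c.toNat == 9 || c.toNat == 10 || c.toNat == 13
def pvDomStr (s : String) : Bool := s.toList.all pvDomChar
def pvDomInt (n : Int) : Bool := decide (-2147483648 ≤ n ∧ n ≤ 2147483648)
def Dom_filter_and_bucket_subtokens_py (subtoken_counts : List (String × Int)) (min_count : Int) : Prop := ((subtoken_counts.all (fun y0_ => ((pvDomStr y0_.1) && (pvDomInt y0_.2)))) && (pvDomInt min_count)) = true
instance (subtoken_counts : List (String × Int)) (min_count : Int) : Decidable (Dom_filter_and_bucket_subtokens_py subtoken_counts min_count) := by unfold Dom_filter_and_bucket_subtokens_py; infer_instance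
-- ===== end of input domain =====

-- B replaces A's single pass (grow the bucket list on the fly, mutate buckets in place) by a
-- staged algorithm: filter the survivors, take the max length, then one scan per length
-- building each bucket directly (alternative decomposition, same results).

-- ===== PORT A =====
-- 'while len(subtoken_buckets) <= len(subtoken): subtoken_buckets.append(set())'
def pvGrow (buckets : List (List String)) (n : Nat) : List (List String) :=
  if _h : buckets.length ≤ n then pvGrow (buckets ++ [[]]) n else buckets
termination_by n + 1 - buckets.length
decreasing_by simp; omega

-- one iteration of A's for-loop body ('continue' = return the state unchanged;
-- 'subtoken_buckets[len(subtoken)].add(subtoken)' = in-range List.set with PySem.Set.add)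
def pvStepA (min_count : Int) (buckets : List (List String)) (p : String × Int) : List (List String) :=
  if p.2 < min_count then buckets
  else
    let n := p.1.toList.length
    let b := pvGrow buckets n
    b.set n (PySem.Set.add (b.getD n []) p.1)

-- the dict parameter arrives as an assoc list; Dict.ofList rebuilds the Python dict
-- (duplicate keys overwrite in place, as in Python) and .items is its iteration order
def filter_and_bucket_subtokens_py (subtoken_counts : List (String × Int)) (min_count : Int) : List (List String) :=
  ((PySem.Dict.ofList subtoken_counts).items).foldl (pvStepA min_count) []

-- ===== PORT B =====
-- 'kept = [s for s, c in subtoken_counts.items() if c >= min_count]', then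
-- 'max(map(len, kept))' (PySem.List.max?; kept is nonempty on that branch), then
-- '[set(s for s in kept if len(s) == l) for l in range(maxlen + 1)]'
def filter_and_bucket_subtokens_py_alt (subtoken_counts : List (String × Int)) (min_count : Int) : List (List String) :=
  let kept := (((PySem.Dict.ofList subtoken_counts).items).filter (fun p => p.2 ≥ min_count)).map (·.1)
  if kept = [] then []
  else
    match PySem.List.max? (kept.map (fun s => s.toList.length)) (fun x => x) with
    | none => []  -- unreachable (kept nonempty)
    | some m => (List.range (m + 1)).map
        (fun l => PySem.Set.ofList (kept.filter (fun s => s.toList.length = l)))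

-- ===== PRECONDITION & SPEC =====
def Spec_filter_and_bucket_subtokens_py (subtoken_counts : List (String × Int)) (min_count : Int) (out : List (List String)) : Prop := out = filter_and_bucket_subtokens_py_alt subtoken_counts min_count
instance (subtoken_counts : List (String × Int)) (min_count : Int) (out : List (List String)) : Decidable (Spec_filter_and_bucket_subtokens_py subtoken_counts min_count out) := by unfold Spec_filter_and_bucket_subtokens_py; infer_instance

-- ===== CLAIM (what is proved, stated in full; the proofs are below) =====
def Claim_equal_filter_and_bucket_subtokens_py : Prop := ∀ (subtoken_counts : List (String × Int)) (min_count : Int), Dom_filter_and_bucket_subtokens_py subtoken_counts min_count → Spec_filter_and_bucket_subtokens_py subtoken_counts min_count (filter_and_bucket_subtokens_py subtoken_counts min_count)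

-- ===== LEMMAS AND PROOFS =====

-- A's loop body on a surviving subtoken only (the count test already done)
def pvStep' (b : List (List String)) (s : String) : List (List String) :=
  let n := s.toList.length
  let bg := pvGrow b n
  bg.set n (PySem.Set.add (bg.getD n []) s)

theorem pvGrow_length (b : List (List String)) (n : Nat) :
    (pvGrow b n).length = max b.length (n + 1) := by
  fun_induction pvGrow b n with
  | case1 b h ih => simp at ih; simp [ih]; omega
  | case2 b h => simp at h; omega

theorem pvGetD_append_nil (b : List (List String)) (l : Nat) :
    (b ++ [([] : List String)]).getD l [] = b.getD l [] := by
  rcases lt_trichotomy l b.length with h | h | h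
  · simp [List.getD, List.getElem?_append_left h]
  · subst h
    simp [List.getD]
  · have e1 : (b ++ [([] : List String)])[l]? = none := by
      rw [List.getElem?_eq_none_iff]; simp; omega
    have e2 : b[l]? = none := by rw [List.getElem?_eq_none_iff]; omega
    simp [List.getD, e1, e2]

theorem pvGrow_getD (b : List (List String)) (n l : Nat) :
    (pvGrow b n).getD l [] = b.getD l [] := by
  fun_induction pvGrow b n with
  | case1 b h ih => rw [ih, pvGetD_append_nil]
  | case2 b h => rfl

-- A's fold over the items equals the fold of pvStep' over the filtered-and-projected list
theorem pvFold_filter (mc : Int) (items : List (String × Int)) (b : List (List String)) :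
    items.foldl (pvStepA mc) b =
      (((items.filter (fun p => p.2 ≥ mc)).map (·.1))).foldl pvStep' b := by
  induction items generalizing b with
  | nil => rfl
  | cons p t ih =>
    by_cases hc : p.2 < mc
    · simp [pvStepA, hc, not_le.mpr hc, ih]
    · simp [not_lt.mp hc, List.foldl_cons, ← ih, pvStepA, hc, pvStep']

def pvM (ks : List String) : Nat := ks.foldl (fun a s => max a (s.toList.length + 1)) 0

theorem pvStep'_length (b : List (List String)) (s : String) :
    (pvStep' b s).length = max b.length (s.toList.length + 1) := by
  simp [pvStep', pvGrow_length]

theorem pvFold_length (ks : List String) :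
    (ks.foldl pvStep' []).length = pvM ks := by
  suffices h : ∀ (b : List (List String)),
      (ks.foldl pvStep' b).length = ks.foldl (fun a s => max a (s.toList.length + 1)) b.length by
    simpa using h []
  induction ks with
  | nil => intro b; rfl
  | cons s t ih => intro b; simp [List.foldl_cons, ih, pvStep'_length]

theorem pvSet_getD (bg : List (List String)) (n l : Nat) (v : List String) (hn : n < bg.length) :
    (bg.set n v).getD l [] = if n = l then v else bg.getD l [] := by
  have hset : (bg.set n v)[l]? = if n = l then some v else bg[l]? :=
    List.getElem?_set_of_lt' v bg hn
  by_cases h : n = l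
  · subst h
    simp [List.getD, hset]
  · simp [List.getD, hset, h]

theorem pvFold_getD (ks : List String) (l : Nat) :
    (ks.foldl pvStep' []).getD l [] =
      PySem.Set.ofList (ks.filter (fun s => s.toList.length = l)) := by
  induction ks using List.reverseRecOn with
  | nil => rfl
  | append_singleton t s ih =>
    rw [List.foldl_append, List.foldl_cons, List.foldl_nil, List.filter_append]
    set b := t.foldl pvStep' [] with hb
    have hn : s.toList.length < (pvGrow b s.toList.length).length := by
      rw [pvGrow_length]; omega
    rw [pvStep', pvSet_getD _ _ _ _ hn]
    simp only [pvGrow_getD]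
    by_cases h : s.toList.length = l
    · rw [if_pos h, h, ih]
      have h' : s.length = l := by simpa using h
      simp [PySem.Set.ofList_eq_foldl, List.foldl_append, h']
    · rw [if_neg h, ih]
      have h' : ¬ s.length = l := by simpa using h
      simp [h']

theorem pvM_succ (k : String) (t : List String) :
    pvM (k :: t) = (t.map (fun s => s.toList.length)).foldl max k.toList.length + 1 := by
  have hgen : ∀ (t : List String) (a : Nat),
      t.foldl (fun a s => max a (s.toList.length + 1)) (a + 1) =
        (t.map (fun s => s.toList.length)).foldl max a + 1 := by
    intro t
    induction t with
    | nil => intro a; rfl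
    | cons s r ih =>
      intro a
      rw [List.foldl_cons, List.map_cons, List.foldl_cons]
      have : max (a + 1) (s.toList.length + 1) = max a s.toList.length + 1 := by omega
      rw [this, ih]
  simpa [pvM] using hgen t k.toList.length

-- ===== VERDICT (by name: the statement is the Claim_ definition above) =====
theorem filter_and_bucket_subtokens_py_spec : Claim_equal_filter_and_bucket_subtokens_py := by
  intro scs mc _
  unfold Spec_filter_and_bucket_subtokens_py filter_and_bucket_subtokens_py filter_and_bucket_subtokens_py_alt
  rw [pvFold_filter]
  set kept := (((PySem.Dict.ofList scs).items).filter (fun p => p.2 ≥ mc)).map (·.1) with hkept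
  cases hk : kept with
  | nil => simp
  | cons k t =>
    rw [if_neg (by simp), List.map_cons, PySem.List.max?_id_cons]
    show List.foldl pvStep' [] (k :: t) =
      (List.range ((t.map (fun s => s.toList.length)).foldl max k.toList.length + 1)).map
        (fun l => PySem.Set.ofList ((k :: t).filter (fun s => s.toList.length = l)))
    have hm1 : (t.map (fun s => s.toList.length)).foldl max k.toList.length + 1 = pvM (k :: t) :=
      (pvM_succ k t).symm
    apply List.ext_getElem
    · rw [pvFold_length, List.length_map, List.length_range, ← hm1]
    · intro i hi _
      simp only [List.getElem_map, List.getElem_range]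
      have hib : i < (List.foldl pvStep' [] (k :: t)).length := hi
      have := pvFold_getD (k :: t) i
      rw [List.getD, List.getElem?_eq_getElem hib, Option.getD_some] at this
      exact this
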